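-- pv_equiv track=rewrite | github.com/Badly89/phone | old/seatable_api_server.py | _map_rows_to_employees
-- ===== SOURCE A (Python) =====
-- def _map_rows_to_employees(rows):
--     """Преобразует строки из SeaTable в формат для фронтенда"""
--     employees = []
--     for row in rows:
--         employee = {
--             "id": row.get('_id', ''),
--             "name": row.get('ФИО') or row.get('Name') or row.get('name') or '',
--             "position": row.get('Должность') or row.get('Position') or '',
--             "department": row.get('Отдел') or row.get('Department') or '',
--             "phone": row.get('Телефон') or row.get('Phone') or row.get('Мобильный телефон') or '',
--             "internalPhone": row.get('Внутренний номер') or row.get('InternalPhone') or '',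
--             "email": row.get('Email') or '',
--             "office": row.get('Кабинет') or row.get('Office') or '',
--             "workHours": row.get('Часы работы') or row.get('WorkHours') or '',
--             "additional": row.get('Дополнительная информация') or '',
--             "legalEntity": row.get('Юридическое лицо') or '',
--             "structuralUnit": row.get('Структурное подразделение') or '',
--             "sector": row.get('Отдел/Сектор') or ''
--         }
--         employees.append(employee)
--     return employees
-- ===== SOURCE B (Python) =====
-- # Inverted single-pass rewrite: instead of querying the row once per candidate
-- # key (13 or-chains), scan the row's items once, routing each entry through a
-- # reverse key->(field, rank) index and keeping the lowest-rank truthy value per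
-- # field; then emit the fields in output order.
-- _PRIORITY = {
--     'ФИО': ('name', 0), 'Name': ('name', 1), 'name': ('name', 2),
--     'Должность': ('position', 0), 'Position': ('position', 1),
--     'Отдел': ('department', 0), 'Department': ('department', 1),
--     'Телефон': ('phone', 0), 'Phone': ('phone', 1), 'Мобильный телефон': ('phone', 2),
--     'Внутренний номер': ('internalPhone', 0), 'InternalPhone': ('internalPhone', 1),
--     'Email': ('email', 0),
--     'Кабинет': ('office', 0), 'Office': ('office', 1),
--     'Часы работы': ('workHours', 0), 'WorkHours': ('workHours', 1),
--     'Дополнительная информация': ('additional', 0),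
--     'Юридическое лицо': ('legalEntity', 0),
--     'Структурное подразделение': ('structuralUnit', 0),
--     'Отдел/Сектор': ('sector', 0),
-- }
-- _FIELDS = ['name', 'position', 'department', 'phone', 'internalPhone', 'email',
--            'office', 'workHours', 'additional', 'legalEntity', 'structuralUnit', 'sector']
--
-- def _map_rows_to_employees(rows):
--     out = []
--     for row in rows:
--         id_value = ''
--         best = {}
--         for key, value in row.items():
--             if key == '_id':
--                 id_value = value
--             elif value:
--                 target = _PRIORITY.get(key)
--                 if target is not None:
--                     field, rank = target
--                     cur = best.get(field)
--                     if cur is None or rank < cur[0]: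
--                         best[field] = (rank, value)
--         employee = {'id': id_value}
--         for field in _FIELDS:
--             employee[field] = best[field][1] if field in best else ''
--         out.append(employee)
--     return out
-- ===== Notes on version B (the rewrite author's own statement) =====
-- stated objective: alternative
-- what changed: Replaces A's thirteen per-field 'or'-chain dict lookups by a single inverted-index pass over each row's items, routing every entry through a key->(field,rank) table and keeping the lowest-rank truthy value per output field.
import Mathlib
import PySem

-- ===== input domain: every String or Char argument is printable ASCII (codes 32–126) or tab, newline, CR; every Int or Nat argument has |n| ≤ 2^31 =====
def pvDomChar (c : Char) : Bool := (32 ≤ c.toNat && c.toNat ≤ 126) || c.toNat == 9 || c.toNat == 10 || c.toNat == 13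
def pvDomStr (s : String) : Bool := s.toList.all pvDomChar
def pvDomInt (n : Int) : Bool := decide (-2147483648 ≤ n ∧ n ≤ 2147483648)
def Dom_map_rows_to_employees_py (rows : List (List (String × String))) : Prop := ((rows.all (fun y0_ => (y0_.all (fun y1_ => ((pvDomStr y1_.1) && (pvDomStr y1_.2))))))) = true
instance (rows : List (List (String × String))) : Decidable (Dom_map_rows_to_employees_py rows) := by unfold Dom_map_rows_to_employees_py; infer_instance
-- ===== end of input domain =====

-- B replaces the thirteen per-field or-chain lookups by ONE inverted-index pass over each
-- row's entries, keeping the lowest-rank truthy value per output field (alternative algorithm).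

-- ===== PORT A =====
-- row.get(k): first match in the association list (dict lookup)
def pvGet (row : List (String × String)) (k : String) : Option String :=
  (row.find? (fun p => p.1 == k)).map (·.2)

-- Python 'x or y' where x : Option String (truthiness: some nonempty), y : String
def pvOr (a : Option String) (b : String) : String :=
  match a with
  | some s => if s = "" then b else s
  | none => b

def map_rows_to_employees_py (rows : List (List (String × String))) : List (List (String × String)) :=
  rows.foldl (fun employees row =>
    employees ++ [[
      ("id", (pvGet row "_id").getD ""),
      ("name", pvOr (pvGet row "ФИО") (pvOr (pvGet row "Name") (pvOr (pvGet row "name") ""))),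
      ("position", pvOr (pvGet row "Должность") (pvOr (pvGet row "Position") "")),
      ("department", pvOr (pvGet row "Отдел") (pvOr (pvGet row "Department") "")),
      ("phone", pvOr (pvGet row "Телефон") (pvOr (pvGet row "Phone") (pvOr (pvGet row "Мобильный телефон") ""))),
      ("internalPhone", pvOr (pvGet row "Внутренний номер") (pvOr (pvGet row "InternalPhone") "")),
      ("email", pvOr (pvGet row "Email") ""),
      ("office", pvOr (pvGet row "Кабинет") (pvOr (pvGet row "Office") "")),
      ("workHours", pvOr (pvGet row "Часы работы") (pvOr (pvGet row "WorkHours") "")),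
      ("additional", pvOr (pvGet row "Дополнительная информация") ""),
      ("legalEntity", pvOr (pvGet row "Юридическое лицо") ""),
      ("structuralUnit", pvOr (pvGet row "Структурное подразделение") ""),
      ("sector", pvOr (pvGet row "Отдел/Сектор") "")]]) []

-- ===== PORT B =====
-- reverse index: source key -> (output field, rank); _PRIORITY in Source B
def pvPriorityTable : List (String × (String × Nat)) :=
  [("ФИО", ("name", 0)), ("Name", ("name", 1)), ("name", ("name", 2)),
   ("Должность", ("position", 0)), ("Position", ("position", 1)),
   ("Отдел", ("department", 0)), ("Department", ("department", 1)),
   ("Телефон", ("phone", 0)), ("Phone", ("phone", 1)), ("Мобильный телефон", ("phone", 2)),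
   ("Внутренний номер", ("internalPhone", 0)), ("InternalPhone", ("internalPhone", 1)),
   ("Email", ("email", 0)),
   ("Кабинет", ("office", 0)), ("Office", ("office", 1)),
   ("Часы работы", ("workHours", 0)), ("WorkHours", ("workHours", 1)),
   ("Дополнительная информация", ("additional", 0)),
   ("Юридическое лицо", ("legalEntity", 0)),
   ("Структурное подразделение", ("structuralUnit", 0)),
   ("Отдел/Сектор", ("sector", 0))]

def pvPriority (k : String) : Option (String × Nat) :=
  (pvPriorityTable.find? (fun e => e.1 == k)).map (·.2)

def pvFields : List String :=
  ["name", "position", "department", "phone", "internalPhone", "email",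
   "office", "workHours", "additional", "legalEntity", "structuralUnit", "sector"]

-- one row-entry step of Source B's inner loop; state = (id_value, best)
def pvStepB (st : String × PySem.Dict String (Nat × String)) (kv : String × String) :
    String × PySem.Dict String (Nat × String) :=
  if kv.1 == "_id" then (kv.2, st.2)
  else if kv.2 ≠ "" then
    match pvPriority kv.1 with
    | some (field, rank) =>
      match st.2.get? field with
      | none => (st.1, st.2.insert field (rank, kv.2))
      | some cur => if rank < cur.1 then (st.1, st.2.insert field (rank, kv.2)) else st
    | none => st
  else st

-- emit the employee dict from the scanned state
def pvEmit (st : String × PySem.Dict String (Nat × String)) : List (String × String) :=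
  ("id", st.1) :: pvFields.map (fun f => (f, match st.2.get? f with | some c => c.2 | none => ""))

def map_rows_to_employees_py_alt (rows : List (List (String × String))) : List (List (String × String)) :=
  rows.foldl (fun out row => out ++ [pvEmit (row.foldl pvStepB ("", PySem.Dict.empty))]) []

-- ===== PRECONDITION & SPEC =====
-- Pre_ requires the keys of each row to be distinct: a row stands for a Python dict, which
-- cannot carry duplicate keys, so on duplicate-key association lists first-vs-last is accidental.
def Pre_map_rows_to_employees_py (rows : List (List (String × String))) : Prop :=
  ∀ row ∈ rows, (row.map Prod.fst).Nodup
instance (rows : List (List (String × String))) : Decidable (Pre_map_rows_to_employees_py rows) := by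
  unfold Pre_map_rows_to_employees_py; infer_instance

def pvWitness_map_rows_to_employees_py : (List (List (String × String))) :=
  [[("_id", "7"), ("Name", "Bob"), ("Email", "")]]

def Spec_map_rows_to_employees_py (rows : List (List (String × String))) (out : List (List (String × String))) : Prop := out = map_rows_to_employees_py_alt rows
instance (rows : List (List (String × String))) (out : List (List (String × String))) : Decidable (Spec_map_rows_to_employees_py rows out) := by unfold Spec_map_rows_to_employees_py; infer_instance

-- ===== CLAIM (what is proved, stated in full; the proofs are below) =====
def Claim_equal_map_rows_to_employees_py : Prop := ∀ (rows : List (List (String × String))), Dom_map_rows_to_employees_py rows → Pre_map_rows_to_employees_py rows → Spec_map_rows_to_employees_py rows (map_rows_to_employees_py rows)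

-- ===== LEMMAS AND PROOFS =====

-- minimum of two ranked candidates, keeping the earlier one on ties (Source B keeps 'cur' unless rank < cur[0])
def pvMerge : Option (Nat × String) → Option (Nat × String) → Option (Nat × String)
  | c, none => c
  | none, some n => some n
  | some c, some n => if n.1 < c.1 then some n else some c

-- the contribution of one row entry to output field f
def pvContrib (f : String) (kv : String × String) : Option (Nat × String) :=
  if kv.1 == "_id" then none
  else if kv.2 ≠ "" then
    match pvPriority kv.1 with
    | some fr => if fr.1 == f then some (fr.2, kv.2) else none
    | none => none
  else none

-- the same contribution phrased along a candidate-key list with base rank i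
def pvCand (kv : String × String) : List String → Nat → Option (Nat × String)
  | [], _ => none
  | k :: ks, i =>
    if k == kv.1 then (if kv.2 ≠ "" then some (i, kv.2) else none) else pvCand kv ks (i + 1)

-- the or-chain result as a ranked option: first candidate key with a truthy value
def pvChainAux (row : List (String × String)) : List String → Nat → Option (Nat × String)
  | [], _ => none
  | k :: ks, i =>
    match pvGet row k with
    | some v => if v ≠ "" then some (i, v) else pvChainAux row ks (i + 1)
    | none => pvChainAux row ks (i + 1)

theorem pvMerge_none_left (x : Option (Nat × String)) : pvMerge none x = x := by
  cases x <;> rfl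

theorem pvMerge_none_right (x : Option (Nat × String)) : pvMerge x none = x := by
  cases x <;> rfl

theorem pvMerge_assoc (a b c : Option (Nat × String)) :
    pvMerge (pvMerge a b) c = pvMerge a (pvMerge b c) := by
  rcases a with _ | ⟨pa, va⟩ <;> rcases b with _ | ⟨pb, vb⟩ <;> rcases c with _ | ⟨pc, vc⟩ <;>
    simp only [pvMerge] <;> (try split_ifs) <;> (try simp only [pvMerge]) <;>
    (try split_ifs) <;> first | rfl | omega

theorem pvStepB_fst (st : String × PySem.Dict String (Nat × String)) (kv : String × String) :
    (pvStepB st kv).1 = if kv.1 == "_id" then kv.2 else st.1 := by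
  by_cases h1 : kv.1 == "_id" <;> by_cases h2 : kv.2 = "" <;> simp [pvStepB, h1, h2]
  cases hp : pvPriority kv.1 with
  | none => simp
  | some fr =>
    obtain ⟨f, r⟩ := fr
    simp only
    cases hg : st.2.get? f with
    | none => simp
    | some cur => simp only; split_ifs <;> rfl

theorem pvStepB_snd_get? (st : String × PySem.Dict String (Nat × String)) (kv : String × String)
    (f : String) : ((pvStepB st kv).2).get? f = pvMerge (st.2.get? f) (pvContrib f kv) := by
  by_cases h1 : kv.1 == "_id" <;> by_cases h2 : kv.2 = "" <;>
    simp [pvStepB, pvContrib, h1, h2, pvMerge_none_right]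
  cases hp : pvPriority kv.1 with
  | none => simp [pvMerge_none_right]
  | some fr =>
    obtain ⟨f', r⟩ := fr
    by_cases hf : f' = f
    · subst hf
      cases hg : st.2.get? f' with
      | none => simp [hg, PySem.Dict.get?_insert, pvMerge]
      | some cur => by_cases hr : r < cur.1 <;>
          simp [hr, hg, PySem.Dict.get?_insert, pvMerge]
    · cases hg : st.2.get? f' with
      | none => simp [hg, PySem.Dict.get?_insert, hf, Ne.symm hf, pvMerge_none_right]
      | some cur => by_cases hr : r < cur.1 <;>
          simp [hr, hg, PySem.Dict.get?_insert, hf, Ne.symm hf, pvMerge_none_right]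

-- projection of the row scan onto the id accumulator
theorem pvFold_fst (row : List (String × String)) :
    ∀ st, (row.foldl pvStepB st).1 = row.foldl (fun a kv => if kv.1 == "_id" then kv.2 else a) st.1 := by
  induction row with
  | nil => intro st; rfl
  | cons kv rest ih =>
    intro st
    simp only [List.foldl_cons, ih, pvStepB_fst]

-- projection of the row scan onto one field of 'best'
theorem pvFold_snd_get? (row : List (String × String)) (f : String) :
    ∀ st, ((row.foldl pvStepB st).2).get? f
      = row.foldl (fun c kv => pvMerge c (pvContrib f kv)) (st.2.get? f) := by
  induction row with
  | nil => intro st; rfl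
  | cons kv rest ih =>
    intro st
    simp only [List.foldl_cons, ih, pvStepB_snd_get?]

theorem pvFold_merge_factor (g : String × String → Option (Nat × String))
    (row : List (String × String)) :
    ∀ c, row.foldl (fun c kv => pvMerge c (g kv)) c
      = pvMerge c (row.foldl (fun c kv => pvMerge c (g kv)) none) := by
  induction row with
  | nil => intro c; exact (pvMerge_none_right c).symm
  | cons kv rest ih =>
    intro c
    simp only [List.foldl_cons, pvMerge_none_left]
    rw [ih (pvMerge c (g kv)), ih (g kv), pvMerge_assoc]

-- any candidate produced with base rank i has rank ≥ i
theorem pvCand_ge (kv : String × String) :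
    ∀ ks i c, pvCand kv ks i = some c → i ≤ c.1 := by
  intro ks
  induction ks with
  | nil => intro i c h; simp [pvCand] at h
  | cons k ks ih =>
    intro i c h
    rw [pvCand] at h
    by_cases h1 : (k == kv.1) = true
    · rw [if_pos h1] at h
      by_cases h2 : kv.2 ≠ ""
      · rw [if_pos h2, Option.some.injEq] at h; subst h; exact Nat.le_refl _
      · rw [if_neg h2] at h; simp at h
    · rw [if_neg h1] at h
      exact Nat.le_of_succ_le (ih (i + 1) c h)

theorem pvChainAux_ge (row : List (String × String)) :
    ∀ ks i c, pvChainAux row ks i = some c → i ≤ c.1 := by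
  intro ks
  induction ks with
  | nil => intro i c h; simp [pvChainAux] at h
  | cons k ks ih =>
    intro i c h
    rw [pvChainAux] at h
    split at h
    · split_ifs at h with hv
      · rw [Option.some.injEq] at h; subst h; exact Nat.le_refl _
      · exact Nat.le_of_succ_le (ih (i + 1) c h)
    · exact Nat.le_of_succ_le (ih (i + 1) c h)

theorem pvGet_cons (a w : String) (rest : List (String × String)) (k : String) :
    pvGet ((a, w) :: rest) k = if a == k then some w else pvGet rest k := by
  simp only [pvGet, List.find?]
  cases h : (a == k) <;> simp [h]

theorem pvGet_not_mem (row : List (String × String)) (k : String)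
    (h : k ∉ row.map Prod.fst) : pvGet row k = none := by
  simp only [pvGet, Option.map_eq_none_iff]
  rw [List.find?_eq_none]
  intro p hp hbeq
  exact h (List.mem_map.mpr ⟨p, hp, by simpa using hbeq⟩)

-- a cons whose key is not a candidate does not change the chain
theorem pvChainAux_cons_irrel (a w : String) (rest : List (String × String)) :
    ∀ ks i, a ∉ ks → pvChainAux ((a, w) :: rest) ks i = pvChainAux rest ks i := by
  intro ks
  induction ks with
  | nil => intro i _; rfl
  | cons k ks ih =>
    intro i ha
    have hak : (a == k) = false := by
      simp only [beq_eq_false_iff_ne, ne_eq]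
      intro h; exact ha (h ▸ List.mem_cons_self)
    rw [pvChainAux, pvChainAux, pvGet_cons, hak]
    rw [ih (i + 1) (fun h => ha (List.mem_cons_of_mem _ h))]
    simp

-- the crux: consuming one fresh-keyed row entry extends the chain value via pvMerge
theorem pvChain_cons (a w : String) (rest : List (String × String))
    (ha : a ∉ rest.map Prod.fst) :
    ∀ ks i, ks.Nodup →
      pvMerge (pvCand (a, w) ks i) (pvChainAux rest ks i) = pvChainAux ((a, w) :: rest) ks i := by
  intro ks
  induction ks with
  | nil => intro i _; rfl
  | cons k ks ih =>
    intro i hnd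
    obtain ⟨hk_ks, hnd'⟩ := List.nodup_cons.mp hnd
    by_cases hka : k = a
    · subst hka
      have harest : k ∉ rest.map Prod.fst := ha
      have hrest : pvGet rest k = none := pvGet_not_mem rest k harest
      by_cases hw : w = ""
      · subst hw
        rw [pvCand, pvChainAux, pvChainAux, pvGet_cons, hrest, beq_self_eq_true]
        simp only [if_true, ne_eq, not_true_eq_false, if_false, ite_self, pvMerge_none_left]
        exact (pvChainAux_cons_irrel k "" rest ks (i + 1) hk_ks).symm
      · rw [pvCand, pvChainAux, pvChainAux, pvGet_cons, hrest, beq_self_eq_true]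
        simp only [if_true, ne_eq, hw, not_false_eq_true, if_pos]
        cases hc : pvChainAux rest ks (i + 1) with
        | none => exact pvMerge_none_right _
        | some c =>
          have hge := pvChainAux_ge rest ks (i + 1) c hc
          simp only [pvMerge]
          rw [if_neg (by omega)]
    · have hbka : (k == a) = false := by simp [hka]
      have hbak : (a == k) = false := by
        simp only [beq_eq_false_iff_ne, ne_eq]
        exact fun h => hka h.symm
      rw [pvCand, pvChainAux, pvChainAux, pvGet_cons, hbka, hbak]
      simp only [Bool.false_eq_true, if_false]
      cases hg : pvGet rest k with
      | some v =>
        by_cases hv : v = ""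
        · subst hv
          simp only [ne_eq, not_true_eq_false, if_false]
          exact ih (i + 1) hnd'
        · simp only [ne_eq, hv, not_false_eq_true, if_pos]
          cases hc : pvCand (a, w) ks (i + 1) with
          | none => exact pvMerge_none_left _
          | some c =>
            have hge := pvCand_ge (a, w) ks (i + 1) c hc
            simp only [pvMerge]
            rw [if_pos (by omega)]
      | none => exact ih (i + 1) hnd'

theorem pvChainAux_nil_row : ∀ (ks : List String) (i : Nat), pvChainAux [] ks i = none := by
  intro ks
  induction ks with
  | nil => intro i; rfl
  | cons k ks ih =>
    intro i
    rw [pvChainAux]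
    have : pvGet [] k = none := rfl
    rw [this]
    exact ih (i + 1)

-- the scanned minimum over a Nodup-keyed row IS the or-chain value
theorem pvFold_cand_eq_chain (ks : List String) (hks : ks.Nodup) :
    ∀ (row : List (String × String)), (row.map Prod.fst).Nodup →
      row.foldl (fun c kv => pvMerge c (pvCand kv ks 0)) none = pvChainAux row ks 0 := by
  intro row
  induction row with
  | nil => intro _; exact (pvChainAux_nil_row ks 0).symm
  | cons kv rest ih =>
    intro hnd
    obtain ⟨a, w⟩ := kv
    rw [List.map_cons, List.nodup_cons] at hnd
    obtain ⟨ha, hrest⟩ := hnd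
    simp only [List.foldl_cons, pvMerge_none_left]
    rw [pvFold_merge_factor, ih hrest]
    exact pvChain_cons a w rest ha ks 0 hks

-- value extraction: the chain option realises the pvOr-chain
theorem pvChain_val (row : List (String × String)) :
    ∀ ks i, (match pvChainAux row ks i with | some c => c.2 | none => "")
      = ks.foldr (fun k acc => pvOr (pvGet row k) acc) "" := by
  intro ks
  induction ks with
  | nil => intro i; rfl
  | cons k ks ih =>
    intro i
    rw [pvChainAux, List.foldr_cons]
    cases hg : pvGet row k with
    | none => rw [pvOr]; exact ih (i + 1)
    | some v =>
      by_cases hv : v = ""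
      · subst hv
        simp only [ne_eq, not_true_eq_false, if_false, pvOr, if_pos rfl]
        exact ih (i + 1)
      · simp [ne_eq, hv, pvOr]

-- all twelve field bridges at once: pvContrib along the table = pvCand along each candidate list
theorem pvContrib_all (kv : String × String) :
    pvContrib "name" kv = pvCand kv ["ФИО", "Name", "name"] 0 ∧
    pvContrib "position" kv = pvCand kv ["Должность", "Position"] 0 ∧
    pvContrib "department" kv = pvCand kv ["Отдел", "Department"] 0 ∧
    pvContrib "phone" kv = pvCand kv ["Телефон", "Phone", "Мобильный телефон"] 0 ∧
    pvContrib "internalPhone" kv = pvCand kv ["Внутренний номер", "InternalPhone"] 0 ∧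
    pvContrib "email" kv = pvCand kv ["Email"] 0 ∧
    pvContrib "office" kv = pvCand kv ["Кабинет", "Office"] 0 ∧
    pvContrib "workHours" kv = pvCand kv ["Часы работы", "WorkHours"] 0 ∧
    pvContrib "additional" kv = pvCand kv ["Дополнительная информация"] 0 ∧
    pvContrib "legalEntity" kv = pvCand kv ["Юридическое лицо"] 0 ∧
    pvContrib "structuralUnit" kv = pvCand kv ["Структурное подразделение"] 0 ∧
    pvContrib "sector" kv = pvCand kv ["Отдел/Сектор"] 0 := by
  obtain ⟨k, v⟩ := kv
  by_cases h0 : k = "_id"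
  · subst h0; simp [pvContrib, pvPriority, pvPriorityTable, pvCand]
  rcases eq_or_ne "ФИО" k with h | h1
  · subst h; simp [pvContrib, pvPriority, pvPriorityTable, pvCand]
  rcases eq_or_ne "Name" k with h | h2
  · subst h; simp [pvContrib, pvPriority, pvPriorityTable, pvCand]
  rcases eq_or_ne "name" k with h | h3
  · subst h; simp [pvContrib, pvPriority, pvPriorityTable, pvCand]
  rcases eq_or_ne "Должность" k with h | h4
  · subst h; simp [pvContrib, pvPriority, pvPriorityTable, pvCand]
  rcases eq_or_ne "Position" k with h | h5
  · subst h; simp [pvContrib, pvPriority, pvPriorityTable, pvCand]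
  rcases eq_or_ne "Отдел" k with h | h6
  · subst h; simp [pvContrib, pvPriority, pvPriorityTable, pvCand]
  rcases eq_or_ne "Department" k with h | h7
  · subst h; simp [pvContrib, pvPriority, pvPriorityTable, pvCand]
  rcases eq_or_ne "Телефон" k with h | h8
  · subst h; simp [pvContrib, pvPriority, pvPriorityTable, pvCand]
  rcases eq_or_ne "Phone" k with h | h9
  · subst h; simp [pvContrib, pvPriority, pvPriorityTable, pvCand]
  rcases eq_or_ne "Мобильный телефон" k with h | h10
  · subst h; simp [pvContrib, pvPriority, pvPriorityTable, pvCand]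
  rcases eq_or_ne "Внутренний номер" k with h | h11
  · subst h; simp [pvContrib, pvPriority, pvPriorityTable, pvCand]
  rcases eq_or_ne "InternalPhone" k with h | h12
  · subst h; simp [pvContrib, pvPriority, pvPriorityTable, pvCand]
  rcases eq_or_ne "Email" k with h | h13
  · subst h; simp [pvContrib, pvPriority, pvPriorityTable, pvCand]
  rcases eq_or_ne "Кабинет" k with h | h14
  · subst h; simp [pvContrib, pvPriority, pvPriorityTable, pvCand]
  rcases eq_or_ne "Office" k with h | h15
  · subst h; simp [pvContrib, pvPriority, pvPriorityTable, pvCand]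
  rcases eq_or_ne "Часы работы" k with h | h16
  · subst h; simp [pvContrib, pvPriority, pvPriorityTable, pvCand]
  rcases eq_or_ne "WorkHours" k with h | h17
  · subst h; simp [pvContrib, pvPriority, pvPriorityTable, pvCand]
  rcases eq_or_ne "Дополнительная информация" k with h | h18
  · subst h; simp [pvContrib, pvPriority, pvPriorityTable, pvCand]
  rcases eq_or_ne "Юридическое лицо" k with h | h19
  · subst h; simp [pvContrib, pvPriority, pvPriorityTable, pvCand]
  rcases eq_or_ne "Структурное подразделение" k with h | h20
  · subst h; simp [pvContrib, pvPriority, pvPriorityTable, pvCand]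
  rcases eq_or_ne "Отдел/Сектор" k with h | h21
  · subst h; simp [pvContrib, pvPriority, pvPriorityTable, pvCand]
  simp [pvContrib, pvPriority, pvPriorityTable, pvCand, h0, h1, h2, h3, h4, h5, h6, h7, h8, h9, h10, h11, h12, h13, h14, h15, h16, h17, h18, h19, h20, h21]

-- one-field wrap-up: the emitted value of field f equals A's or-chain over ks
theorem pvField_val (row : List (String × String)) (hrow : (row.map Prod.fst).Nodup)
    (f : String) (ks : List String) (hks : ks.Nodup)
    (hbridge : ∀ kv, pvContrib f kv = pvCand kv ks 0) :
    (match ((row.foldl pvStepB ("", PySem.Dict.empty)).2).get? f with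
      | some c => c.2 | none => "")
      = ks.foldr (fun k acc => pvOr (pvGet row k) acc) "" := by
  rw [pvFold_snd_get?]
  simp only [PySem.Dict.get?_empty, hbridge]
  rw [pvFold_cand_eq_chain ks hks row hrow, pvChain_val]

-- a fold over keys other than "_id" keeps the id accumulator
theorem pvFold_id_notmem (rest : List (String × String)) :
    ∀ acc, "_id" ∉ rest.map Prod.fst →
      rest.foldl (fun a kv => if kv.1 == "_id" then kv.2 else a) acc = acc := by
  induction rest with
  | nil => intro acc _; rfl
  | cons kv rest ih =>
    intro acc h
    rw [List.map_cons] at h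
    have h1 : (kv.1 == "_id") = false := by
      simp only [beq_eq_false_iff_ne, ne_eq]
      intro he; exact h (he ▸ List.mem_cons_self)
    simp only [List.foldl_cons, h1, Bool.false_eq_true, if_false]
    exact ih acc (fun hm => h (List.mem_cons_of_mem _ hm))

-- last-writer-wins fold over Nodup keys = first-match get
theorem pvId_val (row : List (String × String)) (hrow : (row.map Prod.fst).Nodup) :
    row.foldl (fun a kv => if kv.1 == "_id" then kv.2 else a) "" = (pvGet row "_id").getD "" := by
  induction row with
  | nil => rfl
  | cons kv rest ih =>
    obtain ⟨a, w⟩ := kv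
    rw [List.map_cons, List.nodup_cons] at hrow
    obtain ⟨ha, hrest⟩ := hrow
    rw [List.foldl_cons, pvGet_cons]
    by_cases hk : a = "_id"
    · subst hk
      rw [beq_self_eq_true]
      simp only [if_true, Option.getD_some]
      exact pvFold_id_notmem rest w ha
    · have hb : (a == "_id") = false := by simp [hk]
      rw [hb]
      simp only [Bool.false_eq_true, if_false]
      exact ih hrest

-- one whole row: B's emitted employee equals A's literal row
theorem pvRow_eq (row : List (String × String)) (hrow : (row.map Prod.fst).Nodup) :
    pvEmit (row.foldl pvStepB ("", PySem.Dict.empty)) =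
    [("id", (pvGet row "_id").getD ""),
      ("name", pvOr (pvGet row "ФИО") (pvOr (pvGet row "Name") (pvOr (pvGet row "name") ""))),
      ("position", pvOr (pvGet row "Должность") (pvOr (pvGet row "Position") "")),
      ("department", pvOr (pvGet row "Отдел") (pvOr (pvGet row "Department") "")),
      ("phone", pvOr (pvGet row "Телефон") (pvOr (pvGet row "Phone") (pvOr (pvGet row "Мобильный телефон") ""))),
      ("internalPhone", pvOr (pvGet row "Внутренний номер") (pvOr (pvGet row "InternalPhone") "")),
      ("email", pvOr (pvGet row "Email") ""),
      ("office", pvOr (pvGet row "Кабинет") (pvOr (pvGet row "Office") "")),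
      ("workHours", pvOr (pvGet row "Часы работы") (pvOr (pvGet row "WorkHours") "")),
      ("additional", pvOr (pvGet row "Дополнительная информация") ""),
      ("legalEntity", pvOr (pvGet row "Юридическое лицо") ""),
      ("structuralUnit", pvOr (pvGet row "Структурное подразделение") ""),
      ("sector", pvOr (pvGet row "Отдел/Сектор") "")] := by
  have hid := pvId_val row hrow
  have h1 := pvField_val row hrow "name" _ (by decide) (fun kv => (pvContrib_all kv).1)
  have h2 := pvField_val row hrow "position" _ (by decide) (fun kv => (pvContrib_all kv).2.1)
  have h3 := pvField_val row hrow "department" _ (by decide) (fun kv => (pvContrib_all kv).2.2.1)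
  have h4 := pvField_val row hrow "phone" _ (by decide) (fun kv => (pvContrib_all kv).2.2.2.1)
  have h5 := pvField_val row hrow "internalPhone" _ (by decide) (fun kv => (pvContrib_all kv).2.2.2.2.1)
  have h6 := pvField_val row hrow "email" _ (by decide) (fun kv => (pvContrib_all kv).2.2.2.2.2.1)
  have h7 := pvField_val row hrow "office" _ (by decide) (fun kv => (pvContrib_all kv).2.2.2.2.2.2.1)
  have h8 := pvField_val row hrow "workHours" _ (by decide) (fun kv => (pvContrib_all kv).2.2.2.2.2.2.2.1)
  have h9 := pvField_val row hrow "additional" _ (by decide) (fun kv => (pvContrib_all kv).2.2.2.2.2.2.2.2.1)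
  have h10 := pvField_val row hrow "legalEntity" _ (by decide) (fun kv => (pvContrib_all kv).2.2.2.2.2.2.2.2.2.1)
  have h11 := pvField_val row hrow "structuralUnit" _ (by decide) (fun kv => (pvContrib_all kv).2.2.2.2.2.2.2.2.2.2.1)
  have h12 := pvField_val row hrow "sector" _ (by decide) (fun kv => (pvContrib_all kv).2.2.2.2.2.2.2.2.2.2.2)
  simp only [List.foldr_cons, List.foldr_nil] at h1 h2 h3 h4 h5 h6 h7 h8 h9 h10 h11 h12
  simp only [pvEmit, pvFields, List.map_cons, List.map_nil, pvFold_fst, hid,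
    h1, h2, h3, h4, h5, h6, h7, h8, h9, h10, h11, h12]

-- ===== VERDICT (by name: the statement is the Claim_ definition above) =====
theorem map_rows_to_employees_py_spec : Claim_equal_map_rows_to_employees_py := by
  intro rows hdom hpre
  unfold Spec_map_rows_to_employees_py map_rows_to_employees_py map_rows_to_employees_py_alt
  induction rows using List.reverseRecOn with
  | nil => rfl
  | append_singleton rs r ih =>
    have hr : (r.map Prod.fst).Nodup := hpre r (List.mem_append_right _ List.mem_cons_self)
    have hrs : ∀ row ∈ rs, (row.map Prod.fst).Nodup := fun row h =>
      hpre row (List.mem_append_left _ h)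
    have hdom' : Dom_map_rows_to_employees_py rs := by
      revert hdom
      unfold Dom_map_rows_to_employees_py
      simp only [List.all_append, Bool.and_eq_true]
      exact fun h => h.1
    simp only [List.foldl_append, List.foldl_cons, List.foldl_nil, ih hdom' hrs, pvRow_eq r hr]
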